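-- pv_equiv track=rewrite | github.com/shivansh-candela/altice-web | Netgear/Webpage/webpage_report.py | download_time_table
-- ===== SOURCE A (Python) =====
-- def download_time_table(final_dict, row_head_list):
--     col_head_list = ["Minimum", "Maximum", "Average"]
--     #this is used to add column header
--     var_row = "<th></th>"
--     for row in col_head_list:
--         var_row = var_row + "<th>" + row + "</th>"
--
--     #used to calulate table value and print them in column wise
--     html_struct = dict.fromkeys(list(final_dict.keys()))
--     for band in list(final_dict.keys()):
--         band_type = final_dict[band]["min"]
--         final_data = ""
--         for i in band_type:
--             if i == 0:
--                 final_data = final_data + "<td colspan='1'bgcolor='#CCC6FE'>" + str(i) + "</td>"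
--             else:
--                 final_data = final_data + "<td colspan='1'bgcolor='#CCC6FE'>" + str(i) + "</td>"
--
--         html_struct[band] = final_data
--
--     html_struct1 = dict.fromkeys(list(final_dict.keys()))
--     for band in list(final_dict.keys()):
--         band_type1 = final_dict[band]["max"]
--         final_data1 = ""
--         for i in band_type1:
--             final_data1 = final_data1 + "<td colspan='1'bgcolor='#CCC6FE'>" + str(i) + "</td>"
--
--         html_struct1[band] = final_data1
--     html_struct2 = dict.fromkeys(list(final_dict.keys()))
--     for band in list(final_dict.keys()):
--         band_type2 = final_dict[band]["avg"]
--         final_data2 = ""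
--         for i in band_type2:
--             final_data2 = final_data2 + "<td colspan='1'bgcolor='#CCC6FE'>" + str(i) + "</td>"
--
--         html_struct2[band] = final_data2
--
--     #this is used to get row header along with table values
--     var_col = ""
--     for col in final_dict.keys():
--         var_col = var_col + "<tr><th>" + str(col) + "</th>" + str(html_struct[col]) + str(html_struct1[col]) + str(
--             html_struct2[col]) + "</tr>"
--
--     html_data = """
--                            <table border="1" width="1000px" cellpadding="2" cellspacing="0">
--                              <th style="width:1000px;background-color:grey">File Download Time (millisec)</th>
--                             </table>
--                             <br>
--                             <!-- Table information -->
--                             <p align='left' width='900'>This Table will provide you information of the minimum, maximum and the average time taken by clients to download a webpages</p>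
--                             <table width='1000px' border='1' cellpadding='2' cellspacing='0' >
--                           <tr>
--                             <th colspan='2'>Download time (millisec) </th>
--                           </tr>
--                           <table width='1000px' border='1' >
--                             <tr>
--                                 """ + var_row + """
--                             </tr>
--                             """ + var_col + """
--                          </table>
--                         </table>
--                         <br>
--
--             """
--     return str(html_data)
-- ===== SOURCE B (Python) =====
-- def download_time_table(final_dict, row_head_list):
--     # Single pass: build each band's row inline instead of three intermediate dicts.
--     cell = "<td colspan='1'bgcolor='#CCC6FE'>"
--     var_row = "<th></th>" + "".join("<th>" + h + "</th>" for h in ["Minimum", "Maximum", "Average"])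
--
--     def row(band):
--         cells = "".join(cell + str(i) + "</td>"
--                         for stat in ("min", "max", "avg")
--                         for i in final_dict[band][stat])
--         return "<tr><th>" + band + "</th>" + cells + "</tr>"
--
--     var_col = "".join(row(band) for band in final_dict)
--
--     return """
--                            <table border="1" width="1000px" cellpadding="2" cellspacing="0">
--                              <th style="width:1000px;background-color:grey">File Download Time (millisec)</th>
--                             </table>
--                             <br>
--                             <!-- Table information -->
--                             <p align='left' width='900'>This Table will provide you information of the minimum, maximum and the average time taken by clients to download a webpages</p>
--                             <table width='1000px' border='1' cellpadding='2' cellspacing='0' >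
--                           <tr>
--                             <th colspan='2'>Download time (millisec) </th>
--                           </tr>
--                           <table width='1000px' border='1' >
--                             <tr>
--                                 """ + var_row + """
--                             </tr>
--                             """ + var_col + """
--                          </table>
--                         </table>
--                         <br>
--
--             """
-- ===== Notes on version B (the rewrite author's own statement) =====
-- stated objective: simpler
-- what changed: B replaces A's three separate band loops that populate intermediate dicts (html_struct/html_struct1/html_struct2) plus a final assembly loop with a single pass over the bands that builds each complete <tr> row inline (min/max/avg cells via one nested join), dropping all intermediate dicts.
import Mathlib
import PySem

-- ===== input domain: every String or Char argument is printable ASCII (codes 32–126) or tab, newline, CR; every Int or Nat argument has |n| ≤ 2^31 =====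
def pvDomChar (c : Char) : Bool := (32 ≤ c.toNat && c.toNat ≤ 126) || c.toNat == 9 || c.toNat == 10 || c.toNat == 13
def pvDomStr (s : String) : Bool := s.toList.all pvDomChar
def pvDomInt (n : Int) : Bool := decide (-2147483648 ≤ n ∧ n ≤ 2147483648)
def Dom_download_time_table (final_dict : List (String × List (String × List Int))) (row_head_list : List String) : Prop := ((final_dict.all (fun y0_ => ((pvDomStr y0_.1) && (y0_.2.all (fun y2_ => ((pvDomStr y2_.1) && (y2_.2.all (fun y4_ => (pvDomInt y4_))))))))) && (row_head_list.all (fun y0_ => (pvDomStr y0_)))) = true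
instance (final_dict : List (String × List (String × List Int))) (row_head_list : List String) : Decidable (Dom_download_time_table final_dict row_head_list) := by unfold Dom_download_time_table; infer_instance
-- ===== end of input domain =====

-- B fuses A's three dict-building band loops and the assembly loop into one pass that emits each
-- complete <tr> row directly (objective: simpler — no intermediate dicts). Same HTML on every input.

-- Shared input bridge (type convention): the Python dict-of-dicts argument as a PySem.Dict of PySem.Dicts.
def pvrDict (final_dict : List (String × List (String × List Int))) :
    PySem.Dict String (PySem.Dict String (List Int)) :=
  PySem.Dict.ofList (final_dict.map (fun p => (p.1, PySem.Dict.ofList p.2)))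

-- the template fragments of A's html_data literal (B's source carries the identical literal)
def pvrPre : String := "\n                           <table border=\"1\" width=\"1000px\" cellpadding=\"2\" cellspacing=\"0\">\n                             <th style=\"width:1000px;background-color:grey\">File Download Time (millisec)</th>\n                            </table>\n                            <br>\n                            <!-- Table information -->\n                            <p align='left' width='900'>This Table will provide you information of the minimum, maximum and the average time taken by clients to download a webpages</p>\n                            <table width='1000px' border='1' cellpadding='2' cellspacing='0' >\n                          <tr>\n                            <th colspan='2'>Download time (millisec) </th>\n                          </tr>\n                          <table width='1000px' border='1' >\n                            <tr>\n                                "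
def pvrMid : String := "\n                            </tr>\n                            "
def pvrTail : String := "                      \n                         </table>\n                        </table>\n                        <br>\n\n            "
def pvrCell : String := "<td colspan='1'bgcolor='#CCC6FE'>"

-- ===== PORT A =====
-- Python's dict.fromkeys placeholder (None, overwritten at every key before any read) is ported as
-- starting the insert loop from Dict.empty; str(col)/str(html_struct[col]) are identity on strings.
-- final_dict[band]["…"] is ported with getD (Pre_ guarantees the keys exist, matching Python's KeyError domain).
def download_time_table (final_dict : List (String × List (String × List Int))) (row_head_list : List String) : String :=
  let fd := pvrDict final_dict
  let col_head_list := ["Minimum", "Maximum", "Average"]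
  let var_row := col_head_list.foldl (fun acc row => acc ++ "<th>" ++ row ++ "</th>") "<th></th>"
  let html_struct : PySem.Dict String String :=
    fd.keys.foldl (fun h band =>
      h.insert band (((fd.getD band PySem.Dict.empty).getD "min" []).foldl
        (fun acc i => if i == 0 then acc ++ pvrCell ++ PySem.Int.toStr i ++ "</td>"
                      else acc ++ pvrCell ++ PySem.Int.toStr i ++ "</td>") "")) PySem.Dict.empty
  let html_struct1 : PySem.Dict String String :=
    fd.keys.foldl (fun h band =>
      h.insert band (((fd.getD band PySem.Dict.empty).getD "max" []).foldl
        (fun acc i => acc ++ pvrCell ++ PySem.Int.toStr i ++ "</td>") "")) PySem.Dict.empty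
  let html_struct2 : PySem.Dict String String :=
    fd.keys.foldl (fun h band =>
      h.insert band (((fd.getD band PySem.Dict.empty).getD "avg" []).foldl
        (fun acc i => acc ++ pvrCell ++ PySem.Int.toStr i ++ "</td>") "")) PySem.Dict.empty
  let var_col := fd.keys.foldl (fun acc col =>
      acc ++ "<tr><th>" ++ col ++ "</th>" ++ html_struct.getD col "" ++ html_struct1.getD col ""
        ++ html_struct2.getD col "" ++ "</tr>") ""
  pvrPre ++ var_row ++ pvrMid ++ var_col ++ pvrTail

-- ===== PORT B =====
def pvrRowB (fd : PySem.Dict String (PySem.Dict String (List Int))) (band : String) : String :=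
  let cells := PySem.Str.join ""
    ((["min", "max", "avg"].flatMap (fun stat => (fd.getD band PySem.Dict.empty).getD stat [])).map
      (fun i => pvrCell ++ PySem.Int.toStr i ++ "</td>"))
  "<tr><th>" ++ band ++ "</th>" ++ cells ++ "</tr>"

def download_time_table_alt (final_dict : List (String × List (String × List Int))) (row_head_list : List String) : String :=
  let fd := pvrDict final_dict
  let var_row := "<th></th>" ++ PySem.Str.join "" ((["Minimum", "Maximum", "Average"]).map (fun h => "<th>" ++ h ++ "</th>"))
  let var_col := PySem.Str.join "" (fd.keys.map (pvrRowB fd))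
  pvrPre ++ var_row ++ pvrMid ++ var_col ++ pvrTail

-- ===== PRECONDITION & SPEC =====
-- Pre_ excludes exactly the inputs where Python A raises KeyError: some band whose (dict-semantics)
-- value lacks one of the keys "min"/"max"/"avg".
def Pre_download_time_table (final_dict : List (String × List (String × List Int))) (row_head_list : List String) : Prop :=
  ∀ v ∈ (PySem.Dict.ofList (final_dict.map (fun p => (p.1, PySem.Dict.ofList p.2)))).values,
    v.contains "min" = true ∧ v.contains "max" = true ∧ v.contains "avg" = true
instance (final_dict : List (String × List (String × List Int))) (row_head_list : List String) : Decidable (Pre_download_time_table final_dict row_head_list) := by unfold Pre_download_time_table; infer_instance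

def pvWitness_download_time_table : (List (String × List (String × List Int))) × List String :=
  ([("2G", [("min", [1]), ("max", [2]), ("avg", [3])])], ["a"])

def Spec_download_time_table (final_dict : List (String × List (String × List Int))) (row_head_list : List String) (out : String) : Prop := out = download_time_table_alt final_dict row_head_list
instance (final_dict : List (String × List (String × List Int))) (row_head_list : List String) (out : String) : Decidable (Spec_download_time_table final_dict row_head_list out) := by unfold Spec_download_time_table; infer_instance

-- ===== CLAIM (what is proved, stated in full; the proofs are below) =====
def Claim_equal_download_time_table : Prop := ∀ (final_dict : List (String × List (String × List Int))) (row_head_list : List String), Dom_download_time_table final_dict row_head_list → Pre_download_time_table final_dict row_head_list → Spec_download_time_table final_dict row_head_list (download_time_table final_dict row_head_list)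

-- ===== LEMMAS AND PROOFS =====
theorem pvr_join0_cons (a : String) (l : List String) :
    PySem.Str.join "" (a :: l) = a ++ PySem.Str.join "" l := by
  apply String.toList_inj.mp
  simp only [pysem, String.toList_append]
  cases l <;> simp [PySem.Chars.join, List.intercalate]

theorem pvr_join0_nil : PySem.Str.join "" ([] : List String) = "" := rfl

theorem pvr_join0_append (l1 l2 : List String) :
    PySem.Str.join "" (l1 ++ l2) = PySem.Str.join "" l1 ++ PySem.Str.join "" l2 := by
  induction l1 with
  | nil => simp [pvr_join0_nil]
  | cons a t ih => simp [pvr_join0_cons, ih, String.append_assoc]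

theorem pvr_foldl_append {α : Type} (g : α → String) (l : List α) : ∀ (s : String),
    l.foldl (fun acc x => acc ++ g x) s = s ++ PySem.Str.join "" (l.map g) := by
  induction l with
  | nil => intro s; simp [pvr_join0_nil]
  | cons a t ih => intro s; simp only [List.foldl, List.map, ih, pvr_join0_cons, String.append_assoc]

theorem pvr_getD_foldl_insert_not_mem (f : String → String) (l : List String) (k : String)
    (hk : k ∉ l) : ∀ (d : PySem.Dict String String),
    (l.foldl (fun h b => h.insert b (f b)) d).getD k "" = d.getD k "" := by
  induction l with
  | nil => intro d; rfl
  | cons a t ih =>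
      intro d
      have h1 : k ≠ a := fun h => hk (h ▸ List.mem_cons_self ..)
      have h2 : k ∉ t := fun h => hk (List.mem_cons_of_mem a h)
      simp only [List.foldl]
      rw [ih h2, PySem.Dict.getD_insert_of_ne _ _ _ h1]

theorem pvr_getD_foldl_insert (f : String → String) (l : List String) (k : String)
    (hnd : l.Nodup) (hk : k ∈ l) : ∀ (d : PySem.Dict String String),
    (l.foldl (fun h b => h.insert b (f b)) d).getD k "" = f k := by
  induction l with
  | nil => cases hk
  | cons a t ih =>
      intro d
      simp only [List.foldl]
      rcases List.mem_cons.mp hk with rfl | hmem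
      · rw [pvr_getD_foldl_insert_not_mem f t k (List.nodup_cons.mp hnd).1,
            PySem.Dict.getD_insert_self]
      · exact ih (List.nodup_cons.mp hnd).2 hmem _

-- ===== VERDICT (by name: the statement is the Claim_ definition above) =====
theorem download_time_table_spec : Claim_equal_download_time_table := by
  intro fdl rhl _hdom _hpre
  unfold Spec_download_time_table download_time_table download_time_table_alt pvrRowB
  have hnd : (pvrDict fdl).keys.Nodup := PySem.Dict.nodup_keys_ofList _
  simp only [ite_self, String.append_assoc, pvr_foldl_append, List.flatMap_cons,
    List.flatMap_nil, List.append_nil, List.map_append, pvr_join0_append,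
    String.empty_append]
  congr 2
  congr 1
  congr 1
  congr 1
  apply congrArg
  apply List.map_congr_left
  intro col hcol
  rw [pvr_getD_foldl_insert _ _ _ hnd hcol, pvr_getD_foldl_insert _ _ _ hnd hcol,
    pvr_getD_foldl_insert _ _ _ hnd hcol]
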